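-- pv_equiv track=rewrite | github.com/ferrier1/CIS_210 | Project_1/pin-converter.py | alphacode
-- ===== SOURCE A (Python) =====
-- CONSONANTS = "bcdfghjklmnpqrstvwyz"
--
-- VOWELS = "aeiou"
--
-- def alphacode(pin):
--     letters = []
--     while pin > 0:
--         x = pin % 100
--         vowel = VOWELS[x % 5]
--         cons = CONSONANTS[x // 5]
--         pin = pin // 100
--         letters.extend((vowel, cons))
--     letters.reverse()
--     return ''.join(letters)
-- ===== SOURCE B (Python) =====
-- CONSONANTS = "bcdfghjklmnpqrstvwyz"
--
-- VOWELS = "aeiou"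
--
-- def alphacode(pin):
--     if pin <= 0:
--         return ''
--     x = pin % 100
--     return alphacode(pin // 100) + CONSONANTS[x // 5] + VOWELS[x % 5]
-- ===== Notes on version B (the rewrite author's own statement) =====
-- stated objective: simpler
-- what changed: Replaced the iterative accumulate-then-reverse loop (list of letters extended least-significant chunk first, reversed at the end) with a direct recursion that builds the string front-to-back, most-significant chunk first, with no list and no reverse.
import Mathlib
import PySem

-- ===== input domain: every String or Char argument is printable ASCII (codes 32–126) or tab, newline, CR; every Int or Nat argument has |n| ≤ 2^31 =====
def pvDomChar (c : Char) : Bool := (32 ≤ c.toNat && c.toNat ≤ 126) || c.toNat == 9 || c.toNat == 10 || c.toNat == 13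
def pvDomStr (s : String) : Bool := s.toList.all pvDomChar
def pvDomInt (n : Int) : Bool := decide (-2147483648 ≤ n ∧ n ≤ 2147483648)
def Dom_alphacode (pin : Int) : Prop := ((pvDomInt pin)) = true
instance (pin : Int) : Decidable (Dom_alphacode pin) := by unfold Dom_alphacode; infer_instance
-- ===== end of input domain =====

-- B replaces A's accumulate-then-reverse loop by a direct recursion building the string
-- most-significant chunk first (simpler: no list, no reverse).

-- ===== PORT A =====
def pvConsonants : List Char := "bcdfghjklmnpqrstvwyz".toList
def pvVowels : List Char := "aeiou".toList

-- termination fact for the while loop: pin // 100 strictly decreases for pin > 0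
theorem pv_floordiv_lt (pin : Int) (h : pin > 0) :
    (PySem.Int.floordiv pin 100).toNat < pin.toNat := by
  rw [PySem.Int.floordiv_eq_ediv_of_pos (by norm_num)]
  have h1 : 100 * (pin / 100) + pin % 100 = pin := Int.mul_ediv_add_emod pin 100
  have h2 : 0 ≤ pin % 100 := Int.emod_nonneg pin (by norm_num)
  have h3 : pin % 100 < 100 := Int.emod_lt_of_pos pin (by norm_num)
  omega

-- the 'while pin > 0' loop of A, carrying the letters accumulator
def alphacodeLoop (pin : Int) (letters : List Char) : List Char :=
  if h : pin > 0 then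
    let x := PySem.Int.mod pin 100
    let vowel := (PySem.List.pyGet? pvVowels (PySem.Int.mod x 5)).getD ' '
    let cons := (PySem.List.pyGet? pvConsonants (PySem.Int.floordiv x 5)).getD ' '
    alphacodeLoop (PySem.Int.floordiv pin 100) (letters ++ [vowel, cons])
  else letters
termination_by pin.toNat
decreasing_by exact pv_floordiv_lt pin h

def alphacode (pin : Int) : String := String.ofList ((alphacodeLoop pin []).reverse)

-- ===== PORT B =====
def alphacodeAltGo (pin : Int) : List Char :=
  if h : pin > 0 then
    let x := PySem.Int.mod pin 100
    alphacodeAltGo (PySem.Int.floordiv pin 100)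
      ++ [(PySem.List.pyGet? pvConsonants (PySem.Int.floordiv x 5)).getD ' ',
          (PySem.List.pyGet? pvVowels (PySem.Int.mod x 5)).getD ' ']
  else []
termination_by pin.toNat
decreasing_by exact pv_floordiv_lt pin h

def alphacode_alt (pin : Int) : String := String.ofList (alphacodeAltGo pin)

-- ===== PRECONDITION & SPEC =====
def Spec_alphacode (pin : Int) (out : String) : Prop := out = alphacode_alt pin
instance (pin : Int) (out : String) : Decidable (Spec_alphacode pin out) := by unfold Spec_alphacode; infer_instance

-- ===== CLAIM (what is proved, stated in full; the proofs are below) =====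
def Claim_equal_alphacode : Prop := ∀ (pin : Int), Dom_alphacode pin → Spec_alphacode pin (alphacode pin)

-- ===== LEMMAS AND PROOFS =====
theorem alphacodeLoop_eq (pin : Int) :
    ∀ letters : List Char, alphacodeLoop pin letters = letters ++ (alphacodeAltGo pin).reverse := by
  induction pin using alphacodeAltGo.induct with
  | case1 pin h ih =>
      intro letters
      have hf : PySem.Int.floordiv pin 100 = pin / 100 :=
        PySem.Int.floordiv_eq_ediv_of_pos (by norm_num)
      simp only [hf] at ih
      rw [alphacodeLoop, alphacodeAltGo]
      simp [h, ih]
  | case2 pin h =>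
      intro letters
      rw [alphacodeLoop, alphacodeAltGo]
      simp [h]

-- ===== VERDICT (by name: the statement is the Claim_ definition above) =====
theorem alphacode_spec : Claim_equal_alphacode := by
  intro pin _
  unfold Spec_alphacode alphacode alphacode_alt
  rw [alphacodeLoop_eq]
  simp
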